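-- pv_equiv track=rewrite | github.com/Okomiya/WebAndCow.Py | challenges/debutant/Team_Pokemon/function_1.py | methode
-- ===== SOURCE A (Python) =====
-- def methode(data):  # list + min
--
--     # On recupere la data
--     types = data['types']
--     # On cree une liste pour stocker la quantite par type
--     equipe = [0, 0, 0, 0]
--
--     # boucle for pour enumerer les types disponibles
--     for t in types:
--         if t == "Eau":
--             equipe[0] += 1
--         elif t == "Feu":
--             equipe[1] += 1
--         elif t == "Herbe":
--             equipe[2] += 1
--         else:
--             equipe[3] += 1
--
--     # On retourne le minimum d'equipe faisable
--     return min(equipe)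
-- ===== SOURCE B (Python) =====
-- def _tally(ts):
--     # divide and conquer: tally (Eau, Feu, Herbe, other) counts of ts
--     if len(ts) == 0:
--         return (0, 0, 0, 0)
--     if len(ts) == 1:
--         t = ts[0]
--         if t == "Eau":
--             return (1, 0, 0, 0)
--         if t == "Feu":
--             return (0, 1, 0, 0)
--         if t == "Herbe":
--             return (0, 0, 1, 0)
--         return (0, 0, 0, 1)
--     mid = len(ts) // 2
--     a = _tally(ts[:mid])
--     b = _tally(ts[mid:])
--     return (a[0] + b[0], a[1] + b[1], a[2] + b[2], a[3] + b[3])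
--
--
-- def methode(data):
--     types = data['types']
--     eau, feu, herbe, autre = _tally(types)
--     return min(eau, min(feu, min(herbe, autre)))
-- ===== Notes on version B (the rewrite author's own statement) =====
-- stated objective: alternative
-- what changed: Replaces A's single linear dispatch loop over a 4-slot list with a divide-and-conquer recursion that splits the list in halves, tallies each half recursively into a 4-tuple and merges by componentwise addition, then takes the min.
import Mathlib
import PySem

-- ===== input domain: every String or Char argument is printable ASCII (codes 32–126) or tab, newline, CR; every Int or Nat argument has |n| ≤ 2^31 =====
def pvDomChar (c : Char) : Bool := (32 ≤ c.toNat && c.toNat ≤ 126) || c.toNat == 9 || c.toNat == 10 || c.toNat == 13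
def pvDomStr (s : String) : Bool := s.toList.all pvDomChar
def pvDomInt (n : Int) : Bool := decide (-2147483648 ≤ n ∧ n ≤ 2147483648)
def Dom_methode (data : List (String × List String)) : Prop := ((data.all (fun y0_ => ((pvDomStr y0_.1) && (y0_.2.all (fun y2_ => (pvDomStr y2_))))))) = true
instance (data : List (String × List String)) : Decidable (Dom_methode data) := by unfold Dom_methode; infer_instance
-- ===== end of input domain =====

-- ===== PORT A =====
-- B replaces A's single dispatch loop with a divide-and-conquer tally over halves (objective: alternative).
def methode (data : List (String × List String)) : Int :=
  let types := (PySem.Dict.mk data).getD "types" []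
  let equipe : Int × Int × Int × Int :=
    types.foldl (fun e t =>
      if t == "Eau" then (e.1 + 1, e.2.1, e.2.2.1, e.2.2.2)
      else if t == "Feu" then (e.1, e.2.1 + 1, e.2.2.1, e.2.2.2)
      else if t == "Herbe" then (e.1, e.2.1, e.2.2.1 + 1, e.2.2.2)
      else (e.1, e.2.1, e.2.2.1, e.2.2.2 + 1)) (0, 0, 0, 0)
  min equipe.1 (min equipe.2.1 (min equipe.2.2.1 equipe.2.2.2))

-- ===== PORT B =====
-- _tally: divide and conquer.  ts[:mid] / ts[mid:] with 0 ≤ mid ≤ len(ts) are exactly take/drop.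
def pvTally (ts : List String) : Int × Int × Int × Int :=
  if h0 : ts.length = 0 then (0, 0, 0, 0)
  else if h1 : ts.length = 1 then
    let t := ts.headD ""   -- ts[0], exact since len(ts) = 1
    if t == "Eau" then (1, 0, 0, 0)
    else if t == "Feu" then (0, 1, 0, 0)
    else if t == "Herbe" then (0, 0, 1, 0)
    else (0, 0, 0, 1)
  else
    -- mid = len(ts) // 2 (nonnegative, so Nat division is exact); a / b are the half tallies
    (((pvTally (ts.take (ts.length / 2))).1 + (pvTally (ts.drop (ts.length / 2))).1,
      (pvTally (ts.take (ts.length / 2))).2.1 + (pvTally (ts.drop (ts.length / 2))).2.1,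
      (pvTally (ts.take (ts.length / 2))).2.2.1 + (pvTally (ts.drop (ts.length / 2))).2.2.1,
      (pvTally (ts.take (ts.length / 2))).2.2.2 + (pvTally (ts.drop (ts.length / 2))).2.2.2))
termination_by ts.length
decreasing_by
  all_goals simp [List.length_take, List.length_drop]; omega

def methode_alt (data : List (String × List String)) : Int :=
  let types := (PySem.Dict.mk data).getD "types" []
  let r := pvTally types
  min r.1 (min r.2.1 (min r.2.2.1 r.2.2.2))

-- ===== PRECONDITION & SPEC =====
-- Pre_ excludes inputs without a "types" key, where Python A raises KeyError.
def Pre_methode (data : List (String × List String)) : Prop :=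
  (PySem.Dict.mk data).contains "types" = true
instance (data : List (String × List String)) : Decidable (Pre_methode data) := by unfold Pre_methode; infer_instance
def pvWitness_methode : (List (String × List String)) := [("types", ["Eau", "Feu"])]
def Spec_methode (data : List (String × List String)) (out : Int) : Prop := out = methode_alt data
instance (data : List (String × List String)) (out : Int) : Decidable (Spec_methode data out) := by unfold Spec_methode; infer_instance

-- ===== CLAIM (what is proved, stated in full; the proofs are below) =====
def Claim_equal_methode : Prop := ∀ (data : List (String × List String)), Dom_methode data → Pre_methode data → Spec_methode data (methode data)

-- ===== LEMMAS AND PROOFS =====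
theorem methode_fold_counts (ts : List String) (a b c d : Int) :
    ts.foldl (fun (e : Int × Int × Int × Int) t =>
      if t == "Eau" then (e.1 + 1, e.2.1, e.2.2.1, e.2.2.2)
      else if t == "Feu" then (e.1, e.2.1 + 1, e.2.2.1, e.2.2.2)
      else if t == "Herbe" then (e.1, e.2.1, e.2.2.1 + 1, e.2.2.2)
      else (e.1, e.2.1, e.2.2.1, e.2.2.2 + 1)) (a, b, c, d)
    = (a + ts.count "Eau", b + ts.count "Feu", c + ts.count "Herbe",
       d + ((ts.length : Int) - ts.count "Eau" - ts.count "Feu" - ts.count "Herbe")) := by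
  induction ts generalizing a b c d with
  | nil => simp
  | cons h t ih =>
    simp only [List.foldl_cons]
    split_ifs with h1 h2 h3 <;> rw [ih]
    · have h1' := beq_iff_eq.mp h1; subst h1'
      simp_all; omega
    · have h2' := beq_iff_eq.mp h2
      have h1' : h ≠ "Eau" := by simpa using h1
      subst h2'
      simp_all; omega
    · have h3' := beq_iff_eq.mp h3
      have h1' : h ≠ "Eau" := by simpa using h1
      have h2' : h ≠ "Feu" := by simpa using h2
      subst h3'
      simp_all; omega
    · have h1' : h ≠ "Eau" := by simpa using h1
      have h2' : h ≠ "Feu" := by simpa using h2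
      have h3' : h ≠ "Herbe" := by simpa using h3
      simp_all; omega

theorem pvTally_eq (ts : List String) :
    pvTally ts = ((ts.count "Eau" : Int), (ts.count "Feu" : Int), (ts.count "Herbe" : Int),
      ((ts.length : Int) - ts.count "Eau" - ts.count "Feu" - ts.count "Herbe")) := by
  rw [pvTally]
  split_ifs with h0 h1
  · rw [List.length_eq_zero_iff] at h0; subst h0; simp
  · obtain ⟨t, ht⟩ := List.length_eq_one_iff.mp h1
    subst ht
    by_cases e1 : t = "Eau"
    · subst e1; simp
    · by_cases e2 : t = "Feu"
      · subst e2; simp [e1]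
      · by_cases e3 : t = "Herbe"
        · subst e3; simp [e1, e2]
        · simp [e1, e2, e3]
  · have hlen : 2 ≤ ts.length := by omega
    rw [pvTally_eq (ts.take (ts.length / 2)), pvTally_eq (ts.drop (ts.length / 2))]
    have htake : (ts.take (ts.length / 2)).length = ts.length / 2 := by
      simp [List.length_take]; omega
    have hdrop : (ts.drop (ts.length / 2)).length = ts.length - ts.length / 2 := by
      simp [List.length_drop]
    have hsplit : ∀ s : String, (ts.count s : Int)
        = ((ts.take (ts.length / 2)).count s : Int) + ((ts.drop (ts.length / 2)).count s : Int) := by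
      intro s
      conv_lhs => rw [← List.take_append_drop (ts.length / 2) ts]
      push_cast [List.count_append]
      ring
    simp only [Prod.mk.injEq]
    refine ⟨by rw [hsplit], by rw [hsplit], by rw [hsplit], ?_⟩
    rw [hsplit "Eau", hsplit "Feu", hsplit "Herbe", htake, hdrop]
    have hL : (ts.length : Int) = ((ts.length / 2 : Nat) : Int) + ((ts.length - ts.length / 2 : Nat) : Int) := by
      push_cast; omega
    rw [hL]; ring
termination_by ts.length
decreasing_by
  all_goals simp [List.length_take, List.length_drop]; omega

-- ===== VERDICT (by name: the statement is the Claim_ definition above) =====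
theorem methode_spec : Claim_equal_methode := by
  intro data _ _
  show methode data = methode_alt data
  simp only [methode, methode_alt, methode_fold_counts, pvTally_eq]
  simp
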